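-- pv_equiv track=rewrite | github.com/Sanielia/DiamentBitMatura | hidden_palindromes.py | find_inner_palindromes
-- ===== SOURCE A (Python) =====
-- def is_palindrome(text: str) -> bool:
--     for i in range(len(text) // 2):
--         if text[i] != text[-i-1]:
--             return False
--
--     return True
--
-- def find_inner_palindromes(text: str) -> set[str]:
--     palindromes: set[str] = set()
--     inner_palindromes = set()
--     for i in range(len(text)):
--         for j in range(i + 1, len(text) + 1):
--             if is_palindrome(text[i:j]):
--                 palindromes.add(text[i:j])
--
--     for p in palindromes:
--         for q in palindromes:
--             if p != q and p in q:
--                 inner_palindromes.add(p)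
--
--     return inner_palindromes
-- ===== SOURCE B (Python) =====
-- def find_inner_palindromes(text: str) -> set[str]:
--     n = len(text)
--     # Dynamic programming: table[i][j-i] says whether text[i:j+1] is a palindrome,
--     # computed from the row for i+1 (text[i]==text[j] and inner part palindromic).
--     table = [None] * n
--     prev = []
--     for i in range(n - 1, -1, -1):
--         row = []
--         for j in range(i, n):
--             row.append(text[i] == text[j] and (j - i < 2 or prev[j - i - 2]))
--         table[i] = row
--         prev = row
--     pals = set()
--     for i in range(n):
--         for j in range(i, n):
--             if table[i][j - i]:
--                 pals.add(text[i:j + 1])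
--     # a palindrome is "inner" iff some strictly longer palindrome contains it
--     return {p for p in pals if any(len(q) > len(p) and p in q for q in pals)}
-- ===== Notes on version B (the rewrite author's own statement) =====
-- stated objective: faster
-- what changed: Replaces the O(n^3) substring-by-substring palindrome scan with an O(n^2) dynamic-programming palindrome table (row i computed from row i+1), and replaces the full pairwise containment double loop (p != q and p in q) with a one-sided test against strictly longer palindromes only.
import Mathlib
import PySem

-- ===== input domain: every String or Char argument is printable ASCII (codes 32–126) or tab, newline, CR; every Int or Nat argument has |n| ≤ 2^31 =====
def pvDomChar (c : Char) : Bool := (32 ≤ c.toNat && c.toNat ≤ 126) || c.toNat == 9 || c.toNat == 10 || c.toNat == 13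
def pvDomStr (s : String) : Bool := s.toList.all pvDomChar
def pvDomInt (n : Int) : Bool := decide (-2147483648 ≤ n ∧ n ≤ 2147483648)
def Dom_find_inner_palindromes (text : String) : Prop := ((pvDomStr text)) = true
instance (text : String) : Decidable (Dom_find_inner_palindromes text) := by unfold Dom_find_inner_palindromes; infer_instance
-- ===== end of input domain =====

-- B replaces A's O(n^3) per-substring palindrome scans by an O(n^2) DP palindrome table and
-- tests containment only against strictly longer palindromes; objective: faster (constant/asymptotic in phase 1).


-- ===== PORT A =====
-- helper is_palindrome: the loop 'for i in range(len//2): if t[i] != t[-i-1]: return False' is the all-check below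
def pvIsPalA (s : List Char) : Bool :=
  (PySem.List.pyRange 0 (PySem.Int.floordiv (s.length : Int) 2) 1).all
    (fun i => PySem.List.pyGet? s i == PySem.List.pyGet? s (-i - 1))

def find_inner_palindromes (text : String) : List String :=
  let t := text.toList
  let n : Int := (t.length : Int)
  let pals : PySem.Set (List Char) :=
    (PySem.List.pyRange 0 n 1).foldl (fun acc i =>
      (PySem.List.pyRange (i + 1) (n + 1) 1).foldl (fun acc j =>
        if pvIsPalA (PySem.List.slice t (some i) (some j)) then
          PySem.Set.add acc (PySem.List.slice t (some i) (some j))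
        else acc) acc) PySem.Set.empty
  let inner : PySem.Set (List Char) :=
    pals.foldl (fun acc p =>
      pals.foldl (fun acc q =>
        if !(p == q) && PySem.Chars.isIn p q then PySem.Set.add acc p else acc) acc)
      PySem.Set.empty
  inner.map String.ofList

-- ===== PORT B =====
-- one DP row: for j in range(i, n): row.append(text[i] == text[j] and (j - i < 2 or prev[j - i - 2]))
def pvRowB (t : List Char) (n i : Int) (prev : List Bool) : List Bool :=
  (PySem.List.pyRange i n 1).foldl (fun row j =>
    row ++ [(PySem.List.pyGet? t i == PySem.List.pyGet? t j) &&
            (decide (j - i < 2) || PySem.List.pyGetD prev (j - i - 2) false)]) []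

-- the i-loop 'for i in range(n-1, -1, -1): table[i] = row; prev = row' (prev is the head of the rows built so far)
def pvRowsB (t : List Char) (n : Int) : Nat → List (List Bool) → List (List Bool)
  | 0, acc => acc
  | i + 1, acc => pvRowsB t n i (pvRowB t n (i : Int) (acc.headD []) :: acc)

def find_inner_palindromes_alt (text : String) : List String :=
  let t := text.toList
  let n := t.length
  let table := pvRowsB t (n : Int) n []
  let pals : PySem.Set (List Char) :=
    (PySem.List.pyRange 0 (n : Int) 1).foldl (fun acc i =>
      (PySem.List.pyRange i (n : Int) 1).foldl (fun acc j =>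
        if PySem.List.pyGetD (PySem.List.pyGetD table i []) (j - i) false then
          PySem.Set.add acc (PySem.List.slice t (some i) (some (j + 1)))
        else acc) acc) PySem.Set.empty
  (pals.filter (fun p =>
    pals.any (fun q => decide (p.length < q.length) && PySem.Chars.isIn p q))).map String.ofList

-- ===== PRECONDITION & SPEC =====
def Spec_find_inner_palindromes (text : String) (out : List String) : Prop := out = find_inner_palindromes_alt text
instance (text : String) (out : List String) : Decidable (Spec_find_inner_palindromes text out) := by unfold Spec_find_inner_palindromes; infer_instance

-- ===== CLAIM (what is proved, stated in full; the proofs are below) =====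
def Claim_equal_find_inner_palindromes : Prop := ∀ (text : String), Dom_find_inner_palindromes text → Spec_find_inner_palindromes text (find_inner_palindromes text)

-- ===== LEMMAS AND PROOFS =====

-- the substring text[i:j+1] (j inclusive)
def pvSub (t : List Char) (i j : Nat) : List Char := (t.drop i).take (j + 1 - i)

-- A's is_palindrome loop is the mirror-image test
theorem pvHalf_iff (s : List Char) :
    (∀ k, k < s.length / 2 → s[k]? = s[s.length - 1 - k]?) ↔ s = s.reverse := by
  constructor
  · intro h
    apply List.ext_getElem?
    intro i
    by_cases hi : i < s.length
    · rw [List.getElem?_reverse hi]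
      by_cases h1 : i < s.length / 2
      · exact h i h1
      · by_cases h2 : s.length - 1 - i < s.length / 2
        · have := h _ h2
          have he : s.length - 1 - (s.length - 1 - i) = i := by omega
          rw [he] at this
          exact this.symm
        · have : s.length - 1 - i = i := by omega
          rw [this]
    · rw [List.getElem?_eq_none (by omega), List.getElem?_eq_none (by simp; omega)]
  · intro h k hk
    have hk1 : s.length - 1 - k < s.length := by omega
    calc s[k]? = s.reverse[s.length - 1 - k]? := by
          rw [List.getElem?_reverse hk1]
          congr 1
          omega
      _ = s[s.length - 1 - k]? := by rw [← h]

theorem pvIsPalA_eq (s : List Char) : pvIsPalA s = decide (s = s.reverse) := by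
  unfold pvIsPalA
  rw [Bool.eq_iff_iff]
  have hf : PySem.Int.floordiv (s.length : Int) 2 = ((s.length / 2 : Nat) : Int) := by
    exact_mod_cast PySem.Int.floordiv_natCast s.length 2
  rw [hf, decide_eq_true_eq, ← pvHalf_iff]
  rw [PySem.List.pyRange_one]
  simp only [zero_add, Int.sub_zero, Int.toNat_natCast, List.all_map, List.all_eq_true,
    List.mem_range, Function.comp]
  constructor
  · intro h k hk
    have := h k hk
    have hlen : k + 1 ≤ s.length := by omega
    rw [PySem.List.pyGet?_natCast] at this
    have hneg : -(k : Int) - 1 = -((k + 1 : Nat) : Int) := by push_cast; ring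
    rw [hneg, PySem.List.pyGet?_neg_natCast s (k + 1) (by omega) hlen] at this
    have : s[k]? = s[s.length - (k + 1)]? := by
      rwa [beq_iff_eq] at this
    rw [show s.length - 1 - k = s.length - (k + 1) by omega]
    exact this
  · intro h k hk
    rw [PySem.List.pyGet?_natCast]
    have hlen : k + 1 ≤ s.length := by omega
    have hneg : -(k : Int) - 1 = -((k + 1 : Nat) : Int) := by push_cast; ring
    rw [hneg, PySem.List.pyGet?_neg_natCast s (k + 1) (by omega) hlen]
    have := h k hk
    rw [show s.length - 1 - k = s.length - (k + 1) by omega] at this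
    rwa [beq_iff_eq]

-- decomposition of a substring with at least two characters
theorem pvSub_decomp (t : List Char) (i j : Nat) (hij : i < j) (hj : j < t.length) :
    pvSub t i j = t[i]'(by omega) :: (pvSub t (i + 1) (j - 1) ++ [t[j]'hj]) := by
  unfold pvSub
  rw [List.drop_eq_getElem_cons (by omega)]
  rw [show j + 1 - i = (j - i - 1 + 1) + 1 by omega]
  rw [List.take_succ_cons]
  congr 1
  rw [show j - 1 + 1 - (i + 1) = j - i - 1 by omega]
  rw [List.take_add_one]
  congr 1
  rw [List.getElem?_drop]
  rw [show i + 1 + (j - i - 1) = j by omega]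
  rw [List.getElem?_eq_getElem hj]
  rfl

theorem pvRev_iff (a b : Char) (m : List Char) :
    (a :: (m ++ [b]) = (a :: (m ++ [b])).reverse) ↔ (a = b ∧ m = m.reverse) := by
  rw [List.reverse_cons, List.reverse_append, List.reverse_singleton]
  constructor
  · intro h
    have h' : a :: (m ++ [b]) = b :: (m.reverse ++ [a]) := by simpa using h
    rw [List.cons_eq_cons] at h'
    obtain ⟨rfl, h2⟩ := h'
    refine ⟨rfl, ?_⟩
    exact (List.append_left_inj [a]).mp h2
  · rintro ⟨rfl, h2⟩
    simp [← h2]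

-- palindrome recurrence
theorem pvPal_rec (t : List Char) (i j : Nat) (hij : i < j) (hj : j < t.length) :
    decide (pvSub t i j = (pvSub t i j).reverse) =
      ((t[i]'(by omega) == t[j]'hj) &&
        decide (pvSub t (i + 1) (j - 1) = (pvSub t (i + 1) (j - 1)).reverse)) := by
  rw [pvSub_decomp t i j hij hj]
  rw [Bool.eq_iff_iff]
  simp only [pvRev_iff, decide_eq_true_eq, Bool.and_eq_true, beq_iff_eq]

theorem pvSub_self (t : List Char) (i : Nat) (hi : i < t.length) :
    pvSub t i i = [t[i]'hi] := by
  unfold pvSub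
  rw [List.drop_eq_getElem_cons hi, show i + 1 - i = 1 by omega]
  rfl

theorem pvSub_empty (t : List Char) (i : Nat) : pvSub t (i + 1) i = [] := by
  unfold pvSub
  simp

-- row specification
def pvS (t : List Char) (n i : Nat) : List Bool :=
  (List.range (n - i)).map (fun k => decide (pvSub t i (i + k) = (pvSub t i (i + k)).reverse))

theorem pvRowB_eq (t : List Char) (i : Nat) (hi : i < t.length) :
    pvRowB t (t.length : Int) (i : Int) (pvS t t.length (i + 1)) = pvS t t.length i := by
  unfold pvRowB
  rw [PySem.List.foldl_append_singleton_eq_map, List.nil_append]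
  rw [PySem.List.pyRange_one]
  rw [List.map_map]
  have hcast : ((t.length : Int) - (i : Int)).toNat = t.length - i := by omega
  rw [hcast]
  unfold pvS
  apply List.map_congr_left
  intro k hk
  rw [List.mem_range] at hk
  simp only [Function.comp]
  have hik : i + k < t.length := by omega
  have hj : (i : Int) + (k : Int) = ((i + k : Nat) : Int) := by push_cast; ring
  simp only [hj]
  have hsimp : ((i + k : Nat) : Int) - (i : Int) = (k : Int) := by push_cast; ring
  simp only [hsimp]
  rw [PySem.List.pyGet?_natCast, PySem.List.pyGet?_natCast]
  rw [List.getElem?_eq_getElem hi, List.getElem?_eq_getElem hik]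
  match k with
  | 0 =>
    simp [pvSub_self t i hi]
  | 1 =>
    rw [pvPal_rec t i (i + 1) (by omega) hik]
    simp [pvSub_empty]
  | (k' + 2) =>
    have h1 : decide (((k' + 2 : Nat) : Int) < 2) = false := by
      simp; omega
    rw [h1, Bool.false_or]
    have h2 : ((k' + 2 : Nat) : Int) - 2 = ((k' : Nat) : Int) := by push_cast; ring
    rw [h2, PySem.List.pyGetD_natCast]
    rw [pvPal_rec t i (i + (k' + 2)) (by omega) hik]
    rw [PySem.List.getD_map_range _ _ _ _ (by omega)]
    have h3 : i + 1 + k' = i + (k' + 2) - 1 := by omega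
    simp only [h3]
    simp

theorem pvRowsB_eq (t : List Char) (m : Nat) (hm : m ≤ t.length) :
    pvRowsB t (t.length : Int) m ((List.range' m (t.length - m)).map (pvS t t.length)) =
      (List.range t.length).map (pvS t t.length) := by
  induction m with
  | zero =>
    simp [pvRowsB, List.range_eq_range']
  | succ m ih =>
    show pvRowsB t (t.length : Int) m
      (pvRowB t (t.length : Int) (m : Int)
        (((List.range' (m + 1) (t.length - (m + 1))).map (pvS t t.length)).headD []) ::
        (List.range' (m + 1) (t.length - (m + 1))).map (pvS t t.length)) = _
    have hhead : ((List.range' (m + 1) (t.length - (m + 1))).map (pvS t t.length)).headD [] =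
        pvS t t.length (m + 1) := by
      rcases Nat.eq_or_lt_of_le hm with h | h
      · rw [show t.length - (m + 1) = 0 by omega]
        simp [pvS, show t.length - (m + 1) = 0 by omega]
      · rw [show t.length - (m + 1) = (t.length - (m + 1) - 1) + 1 by omega, List.range'_succ]
        simp
    rw [hhead, pvRowB_eq t m (by omega)]
    have : pvS t t.length m :: (List.range' (m + 1) (t.length - (m + 1))).map (pvS t t.length) =
        (List.range' m (t.length - m)).map (pvS t t.length) := by
      rw [show t.length - m = (t.length - (m + 1)) + 1 by omega, List.range'_succ]
      simp
    rw [this]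
    exact ih (by omega)

theorem pvTable_eq (t : List Char) :
    pvRowsB t (t.length : Int) t.length [] = (List.range t.length).map (pvS t t.length) := by
  have := pvRowsB_eq t t.length le_rfl
  simpa using this

-- Set.add facts
theorem pvAdd_of_mem {α : Type} [BEq α] [LawfulBEq α] (s : PySem.Set α) (x : α) (h : x ∈ s) :
    PySem.Set.add s x = s := by
  simp [PySem.Set.add, PySem.Set.contains, h]

theorem pvAdd_of_not_mem {α : Type} [BEq α] [LawfulBEq α] (s : PySem.Set α) (x : α) (h : ¬ x ∈ s) :
    PySem.Set.add s x = s ++ [x] := by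
  simp [PySem.Set.add, PySem.Set.contains, h]

-- a fold that preserves Nodup
theorem pvNodup_foldl {α β : Type} (l : List α) (f : List β → α → List β)
    (hf : ∀ s x, s.Nodup → (f s x).Nodup) (acc : List β) (ha : acc.Nodup) :
    (l.foldl f acc).Nodup := by
  induction l generalizing acc with
  | nil => exact ha
  | cons x xs ih => exact ih _ (hf _ _ ha)

-- the two phase-1 folds build the same palindrome list
theorem pvPals_eq (t : List Char) :
    (PySem.List.pyRange 0 (t.length : Int) 1).foldl (fun acc i =>
      (PySem.List.pyRange (i + 1) ((t.length : Int) + 1) 1).foldl (fun acc j =>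
        if pvIsPalA (PySem.List.slice t (some i) (some j)) then
          PySem.Set.add acc (PySem.List.slice t (some i) (some j))
        else acc) acc) PySem.Set.empty =
    (PySem.List.pyRange 0 (t.length : Int) 1).foldl (fun acc i =>
      (PySem.List.pyRange i (t.length : Int) 1).foldl (fun acc j =>
        if PySem.List.pyGetD (PySem.List.pyGetD (pvRowsB t (t.length : Int) t.length []) i []) (j - i) false then
          PySem.Set.add acc (PySem.List.slice t (some i) (some (j + 1)))
        else acc) acc) PySem.Set.empty := by
  apply PySem.List.foldl_congr_mem
  intro acc i hi
  rw [PySem.List.mem_pyRange_one] at hi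
  obtain ⟨hi0, hin⟩ := hi
  obtain ⟨iN, rfl⟩ : ∃ m : Nat, i = (m : Int) := ⟨i.toNat, by omega⟩
  have hiNlt : iN < t.length := by omega
  have hA : PySem.List.pyRange ((iN : Int) + 1) ((t.length : Int) + 1) 1 =
      (List.range (t.length - iN)).map (fun (k : Nat) => ((iN : Int) + 1) + (k : Int)) := by
    rw [PySem.List.pyRange_one,
      show ((t.length : Int) + 1 - ((iN : Int) + 1)).toNat = t.length - iN by omega]
  have hB : PySem.List.pyRange (iN : Int) (t.length : Int) 1 =
      (List.range (t.length - iN)).map (fun (k : Nat) => (iN : Int) + (k : Int)) := by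
    rw [PySem.List.pyRange_one,
      show ((t.length : Int) - (iN : Int)).toNat = t.length - iN by omega]
  rw [hA, hB, List.foldl_map, List.foldl_map]
  apply PySem.List.foldl_congr_mem
  intro acc2 k hk
  rw [List.mem_range] at hk
  have hcA : (iN : Int) + 1 + (k : Int) = ((iN + k + 1 : Nat) : Int) := by push_cast; ring
  have hcB : (iN : Int) + (k : Int) + 1 = ((iN + k + 1 : Nat) : Int) := by push_cast; ring
  have hcB2 : (iN : Int) + (k : Int) - (iN : Int) = ((k : Nat) : Int) := by ring
  simp only [hcA, hcB, hcB2]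
  rw [PySem.List.slice_natCast]
  have hsub : List.take (iN + k + 1 - iN) (List.drop iN t) = pvSub t iN (iN + k) := by
    unfold pvSub
    congr 1
  rw [hsub]
  rw [pvIsPalA_eq]
  rw [pvTable_eq]
  rw [PySem.List.pyGetD_natCast (d := ([] : List Bool))]
  rw [PySem.List.pyGetD_natCast (d := false)]
  rw [PySem.List.getD_map_range _ _ _ _ hiNlt]
  unfold pvS
  rw [PySem.List.getD_map_range _ _ _ _ (by omega)]


-- the palindrome list is duplicate-free
theorem pvPals_nodup (t : List Char) :
    ((PySem.List.pyRange 0 (t.length : Int) 1).foldl (fun acc i =>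
      (PySem.List.pyRange (i + 1) ((t.length : Int) + 1) 1).foldl (fun acc j =>
        if pvIsPalA (PySem.List.slice t (some i) (some j)) then
          PySem.Set.add acc (PySem.List.slice t (some i) (some j))
        else acc) acc) PySem.Set.empty).Nodup := by
  apply pvNodup_foldl
  · intro s x hs
    apply pvNodup_foldl
    · intro s2 y hs2
      split
      · exact PySem.Set.nodup_add _ _ hs2
      · exact hs2
    · exact hs
  · simp [PySem.Set.empty]

-- collapsing the inner q-loop of A's second phase
theorem pvInner_collapse {α : Type} [BEq α] [LawfulBEq α] (P : List α) (c : α → Bool) (p : α)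
    (acc : PySem.Set α) :
    P.foldl (fun acc q => if c q then PySem.Set.add acc p else acc) acc =
      if P.any c then PySem.Set.add acc p else acc := by
  induction P generalizing acc with
  | nil => simp
  | cons q Q ih =>
    simp only [List.foldl_cons, List.any_cons]
    by_cases hq : c q
    · simp only [hq, if_pos, Bool.true_or, ih]
      by_cases hQ : Q.any c
      · rw [if_pos hQ, pvAdd_of_mem _ p (by simp [PySem.Set.mem_add])]
      · simp [hQ]
    · simp [hq, ih]

-- the outer p-loop of A's second phase is a filter
theorem pvOuter_filter {α : Type} [BEq α] [LawfulBEq α] (P : List α) (d : α → Bool)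
    (acc : List α) (hP : P.Nodup) (hd : ∀ p ∈ P, p ∉ acc) :
    P.foldl (fun acc p => if d p then PySem.Set.add acc p else acc) acc = acc ++ P.filter d := by
  induction P generalizing acc with
  | nil => simp
  | cons p Q ih =>
    simp only [List.foldl_cons, List.filter_cons]
    by_cases hp : d p
    · rw [if_pos hp, if_pos hp, pvAdd_of_not_mem _ _ (hd p (by simp))]
      rw [ih (acc ++ [p]) hP.of_cons]
      · simp
      · intro q hq
        simp only [List.mem_append, List.mem_singleton]
        rintro (h1 | rfl)
        · exact hd q (by simp [hq]) h1
        · exact (List.nodup_cons.mp hP).1 hq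
    · rw [if_neg hp, if_neg hp, ih acc hP.of_cons (fun q hq => hd q (by simp [hq]))]

-- for any strings, "p ≠ q and p occurs in q" is "p is shorter than q and p occurs in q"
theorem pvPred_eq (p q : List Char) :
    (!(p == q) && PySem.Chars.isIn p q) = (decide (p.length < q.length) && PySem.Chars.isIn p q) := by
  by_cases h : PySem.Chars.isIn p q
  · rw [h]
    simp only [Bool.and_true]
    have hinf : p <:+: q := (PySem.Chars.isIn_iff_infix p q).mp h
    by_cases he : p = q
    · subst he; simp
    · have hle := hinf.length_le
      have hlt : p.length < q.length := by
        rcases lt_or_eq_of_le hle with h1 | h1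
        · exact h1
        · exact absurd (hinf.eq_of_length h1) he
      simp [he, hlt]
  · simp only [Bool.not_eq_true] at h
    rw [h, Bool.and_false, Bool.and_false]

-- ===== VERDICT (by name: the statement is the Claim_ definition above) =====
theorem find_inner_palindromes_spec : Claim_equal_find_inner_palindromes := by
  unfold Claim_equal_find_inner_palindromes
  intro text _
  unfold Spec_find_inner_palindromes
  unfold find_inner_palindromes find_inner_palindromes_alt
  dsimp only
  rw [pvPals_eq text.toList]
  set t := text.toList with ht
  set P : PySem.Set (List Char) :=
    (PySem.List.pyRange 0 (t.length : Int) 1).foldl (fun acc i =>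
      (PySem.List.pyRange i (t.length : Int) 1).foldl (fun acc j =>
        if PySem.List.pyGetD (PySem.List.pyGetD (pvRowsB t (t.length : Int) t.length []) i []) (j - i) false then
          PySem.Set.add acc (PySem.List.slice t (some i) (some (j + 1)))
        else acc) acc) PySem.Set.empty with hP
  have hnd : P.Nodup := by
    rw [hP, ← pvPals_eq t]
    exact pvPals_nodup t
  have hcollapse : (fun (acc : PySem.Set (List Char)) (p : List Char) =>
      P.foldl (fun acc q => if !(p == q) && PySem.Chars.isIn p q then PySem.Set.add acc p else acc) acc) =
      (fun (acc : PySem.Set (List Char)) (p : List Char) =>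
        if P.any (fun q => !(p == q) && PySem.Chars.isIn p q) then PySem.Set.add acc p else acc) :=
    funext fun acc => funext fun p => pvInner_collapse P _ p acc
  rw [hcollapse]
  rw [pvOuter_filter P _ PySem.Set.empty hnd (by intro p _; simp [PySem.Set.empty])]
  have hpred : (fun (p : List Char) => P.any (fun q => !(p == q) && PySem.Chars.isIn p q)) =
      (fun (p : List Char) => P.any (fun q => decide (p.length < q.length) && PySem.Chars.isIn p q)) :=
    funext fun p => by rw [show (fun q => !(p == q) && PySem.Chars.isIn p q) =
      (fun q => decide (p.length < q.length) && PySem.Chars.isIn p q) from funext (pvPred_eq p)]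
  rw [hpred]
  simp [PySem.Set.empty]
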